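-- pv_equiv track=rewrite | github.com/viveshok/codejam | CuttingBoards/main.py | solve
-- ===== SOURCE A (Python) =====
-- def bifilter(xs, idx):
--     lhs = list()
--     rhs = list()
--     for (i, x) in xs:
--         if i < idx:
--             lhs.append((i, x))
--         else:
--             rhs.append((i, x))
--     return (lhs, rhs)
--
-- def solve(xs, ys):
--     if not xs:
--         return sum([y for (_i, y) in ys])
--     if not ys:
--         return sum([x for (_i, x) in xs])
--     if xs[-1][1] >= ys[-1][1]:
--         (idx, val) = xs.pop()
--         (lhs, rhs) = bifilter(xs, idx)
--         return val + solve(lhs, ys[:]) + solve(rhs, ys[:])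
--     (idx, val) = ys.pop()
--     (lhs, rhs) = bifilter(ys, idx)
--     return val + solve(xs[:], lhs) + solve(xs[:], rhs)
-- ===== SOURCE B (Python) =====
-- def bifilter(xs, idx):
--     lhs = list()
--     rhs = list()
--     for (i, x) in xs:
--         if i < idx:
--             lhs.append((i, x))
--         else:
--             rhs.append((i, x))
--     return (lhs, rhs)
--
-- def solve(xs, ys):
--     # iterative worklist instead of recursion; like A it pops the original
--     # lists in place (return value is what is proved equivalent)
--     total = 0
--     stack = [(xs, ys)]
--     while stack:
--         xs, ys = stack.pop()
--         if not xs: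
--             total += sum(y for (_i, y) in ys)
--         elif not ys:
--             total += sum(x for (_i, x) in xs)
--         elif xs[-1][1] >= ys[-1][1]:
--             (idx, val) = xs.pop()
--             (lhs, rhs) = bifilter(xs, idx)
--             total += val
--             stack.append((lhs, ys[:]))
--             stack.append((rhs, ys[:]))
--         else:
--             (idx, val) = ys.pop()
--             (lhs, rhs) = bifilter(ys, idx)
--             total += val
--             stack.append((xs[:], lhs))
--             stack.append((xs[:], rhs))
--     return total
-- ===== Notes on version B (the rewrite author's own statement) =====
-- stated objective: alternative
-- what changed: Replaces A's nested recursion with an iterative explicit-stack worklist and a running total accumulator (order of sub-problem processing changes, sum is unchanged).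
import Mathlib
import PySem

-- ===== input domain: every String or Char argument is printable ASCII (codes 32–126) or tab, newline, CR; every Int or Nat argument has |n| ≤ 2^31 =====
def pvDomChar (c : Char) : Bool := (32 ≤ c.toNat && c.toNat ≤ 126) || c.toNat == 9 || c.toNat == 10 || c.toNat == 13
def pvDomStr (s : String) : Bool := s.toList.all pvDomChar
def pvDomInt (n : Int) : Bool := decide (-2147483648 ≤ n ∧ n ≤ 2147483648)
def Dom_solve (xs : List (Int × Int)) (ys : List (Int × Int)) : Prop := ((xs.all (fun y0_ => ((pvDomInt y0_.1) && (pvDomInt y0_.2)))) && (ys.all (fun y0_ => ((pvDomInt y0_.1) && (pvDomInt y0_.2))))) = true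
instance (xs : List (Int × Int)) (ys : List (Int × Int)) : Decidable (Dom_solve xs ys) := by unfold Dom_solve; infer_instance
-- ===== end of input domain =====

-- B is an iterative explicit-stack worklist with a running total instead of A's nested
-- recursion; return-value equivalence only (both Pythons pop the original argument in place).

-- ===== PORT A =====
-- bifilter: one pass appending to lhs/rhs, as in the Python
def bifilter (xs : List (Int × Int)) (idx : Int) :
    List (Int × Int) × List (Int × Int) :=
  xs.foldl
    (fun acc p => if p.1 < idx then (acc.1 ++ [p], acc.2) else (acc.1, acc.2 ++ [p]))
    ([], [])

-- A's recursion, structurally on a fuel bound (a pure totality guard: fuel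
-- |xs|+|ys|+1 always suffices, proved below); xs.pop() → getLast! / dropLast
def solveFuel (fuel : Nat) (xs : List (Int × Int)) (ys : List (Int × Int)) : Int :=
  match fuel with
  | 0 => 0
  | fuel + 1 =>
    if xs = [] then (ys.map Prod.snd).sum
    else if ys = [] then (xs.map Prod.snd).sum
    else
      let x := xs.getLast!
      let y := ys.getLast!
      if x.2 ≥ y.2 then
        let pr := bifilter xs.dropLast x.1
        x.2 + solveFuel fuel pr.1 ys + solveFuel fuel pr.2 ys
      else
        let pr := bifilter ys.dropLast y.1
        y.2 + solveFuel fuel xs pr.1 + solveFuel fuel xs pr.2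

def solve (xs : List (Int × Int)) (ys : List (Int × Int)) : Int :=
  solveFuel (xs.length + ys.length + 1) xs ys

-- ===== PORT B =====
-- B's while loop over the explicit stack; Python pushes lhs then rhs, so rhs is
-- on top.  The fuel is a totality guard only: one unit per loop iteration, and
-- Σ 2·3^(|xs|+|ys|) + 1 over the pending frames is proved sufficient below.
def stackFuel (stack : List (List (Int × Int) × List (Int × Int))) : Nat :=
  (stack.map (fun f => 2 * 3 ^ (f.1.length + f.2.length))).sum

def solveLoop (fuel : Nat) (stack : List (List (Int × Int) × List (Int × Int)))
    (total : Int) : Int :=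
  match fuel, stack with
  | _, [] => total
  | 0, _ => total
  | fuel + 1, (xs, ys) :: rest =>
    if xs = [] then solveLoop fuel rest (total + (ys.map Prod.snd).sum)
    else if ys = [] then solveLoop fuel rest (total + (xs.map Prod.snd).sum)
    else
      let x := xs.getLast!
      let y := ys.getLast!
      if x.2 ≥ y.2 then
        let pr := bifilter xs.dropLast x.1
        solveLoop fuel ((pr.2, ys) :: (pr.1, ys) :: rest) (total + x.2)
      else
        let pr := bifilter ys.dropLast y.1
        solveLoop fuel ((xs, pr.2) :: (xs, pr.1) :: rest) (total + y.2)

def solve_alt (xs : List (Int × Int)) (ys : List (Int × Int)) : Int :=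
  solveLoop (stackFuel [(xs, ys)] + 1) [(xs, ys)] 0

-- ===== PRECONDITION & SPEC =====
def Spec_solve (xs : List (Int × Int)) (ys : List (Int × Int)) (out : Int) : Prop := out = solve_alt xs ys
instance (xs : List (Int × Int)) (ys : List (Int × Int)) (out : Int) : Decidable (Spec_solve xs ys out) := by unfold Spec_solve; infer_instance

-- ===== CLAIM (what is proved, stated in full; the proofs are below) =====
def Claim_equal_solve : Prop := ∀ (xs : List (Int × Int)) (ys : List (Int × Int)), Dom_solve xs ys → Spec_solve xs ys (solve xs ys)

-- ===== LEMMAS AND PROOFS =====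

theorem bifilter_len_aux (xs : List (Int × Int)) (idx : Int)
    (l r : List (Int × Int)) :
    (xs.foldl (fun acc p => if p.1 < idx then (acc.1 ++ [p], acc.2) else (acc.1, acc.2 ++ [p])) (l, r)).1.length
    + (xs.foldl (fun acc p => if p.1 < idx then (acc.1 ++ [p], acc.2) else (acc.1, acc.2 ++ [p])) (l, r)).2.length
    = l.length + r.length + xs.length := by
  induction xs generalizing l r with
  | nil => simp
  | cons p t ih =>
    simp only [List.foldl_cons]
    by_cases h : p.1 < idx
    · simp only [h, if_pos]; rw [ih]; simp; omega
    · simp only [h, if_neg, not_false_iff]; rw [ih]; simp; omega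

theorem bifilter_length (xs : List (Int × Int)) (idx : Int) :
    (bifilter xs idx).1.length + (bifilter xs idx).2.length = xs.length := by
  have := bifilter_len_aux xs idx [] []
  simpa [bifilter] using this

theorem bifilter_fst_lt (xs : List (Int × Int)) (hx : xs ≠ []) :
    (bifilter xs.dropLast xs.getLast!.1).1.length < xs.length := by
  have h := bifilter_length xs.dropLast xs.getLast!.1
  have : xs.length ≠ 0 := by simpa [List.length_eq_zero_iff] using hx
  rw [List.length_dropLast] at h
  omega

theorem bifilter_snd_lt (xs : List (Int × Int)) (hx : xs ≠ []) :
    (bifilter xs.dropLast xs.getLast!.1).2.length < xs.length := by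
  have h := bifilter_length xs.dropLast xs.getLast!.1
  have : xs.length ≠ 0 := by simpa [List.length_eq_zero_iff] using hx
  rw [List.length_dropLast] at h
  omega

-- the fuel is irrelevant once it exceeds |xs| + |ys|
theorem solveFuel_irrel (f : Nat) :
    ∀ (g : Nat) (xs ys : List (Int × Int)),
      xs.length + ys.length < f → xs.length + ys.length < g →
      solveFuel f xs ys = solveFuel g xs ys := by
  induction f with
  | zero => intro g xs ys hf _; omega
  | succ f ih =>
    intro g xs ys hf hg
    match g with
    | 0 => omega
    | g + 1 =>
      rw [solveFuel, solveFuel]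
      by_cases hx : xs = []
      · simp [hx]
      · by_cases hy : ys = []
        · simp [hx, hy]
        · simp only [hx, hy, if_false]
          by_cases hc : xs.getLast!.2 ≥ ys.getLast!.2
          · simp only [if_pos hc]
            have h1 := bifilter_fst_lt xs hx
            have h2 := bifilter_snd_lt xs hx
            rw [ih g _ ys (by omega) (by omega), ih g _ ys (by omega) (by omega)]
          · simp only [if_neg hc]
            have h1 := bifilter_fst_lt ys hy
            have h2 := bifilter_snd_lt ys hy
            rw [ih g xs _ (by omega) (by omega), ih g xs _ (by omega) (by omega)]

-- unfolding equations for the A port at adequate fuel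
theorem solve_nil_left (ys : List (Int × Int)) : solve [] ys = (ys.map Prod.snd).sum := by
  rw [solve, solveFuel]; simp

theorem solve_nil_right (xs : List (Int × Int)) (hx : xs ≠ []) :
    solve xs [] = (xs.map Prod.snd).sum := by
  rw [solve, solveFuel]; simp [hx]

theorem solve_step_left (xs ys : List (Int × Int)) (hx : xs ≠ []) (hy : ys ≠ [])
    (hc : xs.getLast!.2 ≥ ys.getLast!.2) :
    solve xs ys = xs.getLast!.2
      + solve (bifilter xs.dropLast xs.getLast!.1).1 ys
      + solve (bifilter xs.dropLast xs.getLast!.1).2 ys := by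
  have h1 := bifilter_fst_lt xs hx
  have h2 := bifilter_snd_lt xs hx
  rw [solve, solveFuel]
  simp only [hx, hy, if_false, if_pos hc]
  rw [solve, solve]
  rw [solveFuel_irrel (xs.length + ys.length)
        ((bifilter xs.dropLast xs.getLast!.1).1.length + ys.length + 1)
        (bifilter xs.dropLast xs.getLast!.1).1 ys (by omega) (by omega),
      solveFuel_irrel (xs.length + ys.length)
        ((bifilter xs.dropLast xs.getLast!.1).2.length + ys.length + 1)
        (bifilter xs.dropLast xs.getLast!.1).2 ys (by omega) (by omega)]

theorem solve_step_right (xs ys : List (Int × Int)) (hx : xs ≠ []) (hy : ys ≠ [])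
    (hc : ¬ xs.getLast!.2 ≥ ys.getLast!.2) :
    solve xs ys = ys.getLast!.2
      + solve xs (bifilter ys.dropLast ys.getLast!.1).1
      + solve xs (bifilter ys.dropLast ys.getLast!.1).2 := by
  have h1 := bifilter_fst_lt ys hy
  have h2 := bifilter_snd_lt ys hy
  rw [solve, solveFuel]
  simp only [hx, hy, if_false, if_neg hc]
  rw [solve, solve]
  rw [solveFuel_irrel (xs.length + ys.length)
        (xs.length + (bifilter ys.dropLast ys.getLast!.1).1.length + 1)
        xs (bifilter ys.dropLast ys.getLast!.1).1 (by omega) (by omega),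
      solveFuel_irrel (xs.length + ys.length)
        (xs.length + (bifilter ys.dropLast ys.getLast!.1).2.length + 1)
        xs (bifilter ys.dropLast ys.getLast!.1).2 (by omega) (by omega)]

theorem pow3_mono {a b : Nat} (h : a ≤ b) : 3 ^ a ≤ 3 ^ b :=
  Nat.pow_le_pow_right (by norm_num) h

-- the stack-fuel budget drops by at least one per pushed pair of children
theorem stackFuel_split (n a b : Nat) (ha : a < n) (hb : b < n) :
    2 * 3 ^ a + 2 * 3 ^ b + 1 ≤ 2 * 3 ^ n := by
  have e : n = (n - 1) + 1 := by omega
  have h1 : (3 : Nat) ^ a ≤ 3 ^ (n - 1) := pow3_mono (by omega)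
  have h2 : (3 : Nat) ^ b ≤ 3 ^ (n - 1) := pow3_mono (by omega)
  have hp : 0 < 3 ^ (n - 1) := pow_pos (by norm_num) _
  have e3 : 3 ^ n = 3 ^ (n - 1) * 3 := by
    calc 3 ^ n = 3 ^ ((n - 1) + 1) := by rw [← e]
    _ = 3 ^ (n - 1) * 3 := pow_succ _ _
  omega

theorem pow3_pos (n : Nat) : 0 < 2 * 3 ^ n :=
  Nat.succ_le_of_lt (by positivity)

-- the loop invariant: at adequate fuel, the worklist returns the accumulator
-- plus A's value on every pending frame
theorem solveLoop_eq (f : Nat) :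
    ∀ (stack : List (List (Int × Int) × List (Int × Int))) (total : Int),
      stackFuel stack < f →
      solveLoop f stack total
        = total + (stack.map (fun fr => solve fr.1 fr.2)).sum := by
  induction f with
  | zero => intro stack total h; omega
  | succ f ih =>
    intro stack total h
    match stack with
    | [] => simp [solveLoop]
    | (xs, ys) :: rest =>
      have hsf : stackFuel ((xs, ys) :: rest)
          = 2 * 3 ^ (xs.length + ys.length) + stackFuel rest := by
        simp [stackFuel]
      by_cases hx : xs = []
      · rw [solveLoop]
        simp only [hx, if_true]
        rw [ih rest _ (by have := pow3_pos (xs.length + ys.length); omega)]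
        simp [solve_nil_left]
        ring
      · by_cases hy : ys = []
        · rw [solveLoop]
          simp only [hx, hy, if_false, if_true]
          rw [ih rest _ (by have := pow3_pos (xs.length + ys.length); omega)]
          simp [solve_nil_right xs hx]
          ring
        · rw [solveLoop]
          simp only [hx, hy, if_false]
          by_cases hc : xs.getLast!.2 ≥ ys.getLast!.2
          · simp only [if_pos hc]
            have h1 := bifilter_fst_lt xs hx
            have h2 := bifilter_snd_lt xs hx
            have hb : stackFuel ((((bifilter xs.dropLast xs.getLast!.1).2, ys))
                :: (((bifilter xs.dropLast xs.getLast!.1).1, ys)) :: rest) < f := by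
              have hsf2 : stackFuel ((((bifilter xs.dropLast xs.getLast!.1).2, ys))
                  :: (((bifilter xs.dropLast xs.getLast!.1).1, ys)) :: rest)
                  = 2 * 3 ^ ((bifilter xs.dropLast xs.getLast!.1).2.length + ys.length)
                    + (2 * 3 ^ ((bifilter xs.dropLast xs.getLast!.1).1.length + ys.length)
                    + stackFuel rest) := by simp [stackFuel]
              have hs := stackFuel_split (xs.length + ys.length)
                ((bifilter xs.dropLast xs.getLast!.1).1.length + ys.length)
                ((bifilter xs.dropLast xs.getLast!.1).2.length + ys.length)
                (by omega) (by omega)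
              omega
            rw [ih _ _ hb]
            simp only [List.map_cons, List.sum_cons]
            rw [solve_step_left xs ys hx hy hc]
            ring
          · simp only [if_neg hc]
            have h1 := bifilter_fst_lt ys hy
            have h2 := bifilter_snd_lt ys hy
            have hb : stackFuel (((xs, (bifilter ys.dropLast ys.getLast!.1).2))
                :: ((xs, (bifilter ys.dropLast ys.getLast!.1).1)) :: rest) < f := by
              have hsf2 : stackFuel (((xs, (bifilter ys.dropLast ys.getLast!.1).2))
                  :: ((xs, (bifilter ys.dropLast ys.getLast!.1).1)) :: rest)
                  = 2 * 3 ^ (xs.length + (bifilter ys.dropLast ys.getLast!.1).2.length)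
                    + (2 * 3 ^ (xs.length + (bifilter ys.dropLast ys.getLast!.1).1.length)
                    + stackFuel rest) := by simp [stackFuel]
              have hs := stackFuel_split (xs.length + ys.length)
                (xs.length + (bifilter ys.dropLast ys.getLast!.1).1.length)
                (xs.length + (bifilter ys.dropLast ys.getLast!.1).2.length)
                (by omega) (by omega)
              omega
            rw [ih _ _ hb]
            simp only [List.map_cons, List.sum_cons]
            rw [solve_step_right xs ys hx hy hc]
            ring

-- ===== VERDICT (by name: the statement is the Claim_ definition above) =====
theorem solve_spec : Claim_equal_solve := by
  intro xs ys _hd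
  unfold Spec_solve solve_alt
  rw [solveLoop_eq _ _ _ (by omega)]
  simp
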